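-- pv_equiv track=rewrite | github.com/Harish-Rusum/2048-Ascii | scripts/gravity.py | gravCalc
-- ===== SOURCE A (Python) =====
-- def gravCalc(mat, dir):
--     if dir in ["r", "l"]:
--         for i in range(len(mat)):
--             row = mat[i]
--             if dir == "l":
--                 row = sorted(row, key=lambda x: x == 0)
--             else:
--                 row = sorted(row, key=lambda x: x == 0, reverse=True)
--             mat[i] = row
--     elif dir in ["d", "u"]:
--         transposed = [[mat[j][i] for j in range(len(mat))] for i in range(len(mat[0]))]
--         for i in range(len(transposed)):
--             row = transposed[i]
--             if dir == "u":
--                 row = sorted(row, key=lambda x: x == 0)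
--             else:
--                 row = sorted(row, key=lambda x: x == 0, reverse=True)
--             transposed[i] = row
--         mat = [[transposed[j][i] for j in range(len(transposed))] for i in range(len(transposed[0]))]
--     return mat
-- ===== SOURCE B (Python) =====
-- def gravCalc(mat, dir):
--     def compact(row, zeros_first):
--         nz = [x for x in row if x != 0]
--         zs = [0] * (len(row) - len(nz))
--         return zs + nz if zeros_first else nz + zs
--
--     if dir == "l":
--         return [compact(row, False) for row in mat]
--     if dir == "r":
--         return [compact(row, True) for row in mat]
--     if dir in ("u", "d"):
--         cols = [compact(list(col), dir == "d") for col in zip(*mat)]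
--         return [list(row) for row in zip(*cols)]
--     return mat
-- ===== Notes on version B (the rewrite author's own statement) =====
-- stated objective: alternative
-- what changed: Replaces the per-row/column stable sort by key (x==0) with a single-pass linear partition (collect nonzeros in order, pad with zeros) and replaces A's index-based double transposition with zip(*...); not measurably faster in practice since Timsort is near-linear on a two-valued key; equivalence is about the return value only (A mutates mat in place for 'l'/'r').
-- outside the precondition, e.g. on gravCalc([[1, 0], [2, 3, 4]], 'u'): A returns [[1, 3], [2, 0]], B returns [[1, 3], [2, 0]]
import Mathlib
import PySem

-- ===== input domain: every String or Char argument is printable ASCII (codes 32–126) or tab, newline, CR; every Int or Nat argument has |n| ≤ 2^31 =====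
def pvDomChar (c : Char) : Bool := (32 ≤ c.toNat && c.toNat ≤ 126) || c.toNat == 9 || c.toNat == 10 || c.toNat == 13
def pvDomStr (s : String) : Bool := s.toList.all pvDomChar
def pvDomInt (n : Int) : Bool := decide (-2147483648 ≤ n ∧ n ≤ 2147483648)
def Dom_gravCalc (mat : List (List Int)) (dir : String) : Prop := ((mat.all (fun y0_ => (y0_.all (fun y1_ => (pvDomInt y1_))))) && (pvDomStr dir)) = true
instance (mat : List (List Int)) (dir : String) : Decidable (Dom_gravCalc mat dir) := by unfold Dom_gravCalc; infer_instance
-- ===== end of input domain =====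

-- B replaces A's per-row/column stable sorts (key x==0) by a single-pass partition (nonzeros, then zero
-- padding) and A's index-based double transposition by a zip-style transpose; equivalence is about the
-- RETURN value only (the Python A mutates mat in place for "l"/"r").


-- ===== PORT A =====
-- [[mat[j][i] for j in range(len(mat))] for i in range(len(mat[0]))]  (mat[0] is nonempty under Pre_)
def pyTransposeA (m : List (List Int)) : List (List Int) :=
  (List.range m.headI.length).map (fun i => (List.range m.length).map (fun j => (m.getD j []).getD i 0))

def gravCalc (mat : List (List Int)) (dir : String) : List (List Int) :=
  if dir = "r" ∨ dir = "l" then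
    mat.map (fun row =>
      if dir = "l" then PySem.List.sorted row (fun x => x == 0)
      else PySem.List.sorted row (fun x => x == 0) true)
  else if dir = "d" ∨ dir = "u" then
    let transposed := pyTransposeA mat
    let transposed := transposed.map (fun row =>
      if dir = "u" then PySem.List.sorted row (fun x => x == 0)
      else PySem.List.sorted row (fun x => x == 0) true)
    pyTransposeA transposed
  else mat

-- ===== PORT B =====
-- nonzeros in their order, then the zero padding (or the padding first)
def compactRow (row : List Int) (zerosFirst : Bool) : List Int :=
  let nz := row.filter (fun x => x != 0)
  let zs := List.replicate (row.length - nz.length) 0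
  if zerosFirst then zs ++ nz else nz ++ zs

-- zip(*m): truncating transpose, peeled column by column
def pyZipStar (m : List (List Int)) : List (List Int) :=
  if _h : m.isEmpty || m.any (fun r => r.isEmpty) then []
  else (m.map (fun r => r.headI)) :: pyZipStar (m.map (fun r => r.tail))
termination_by m.headI.length
decreasing_by
  simp only [Bool.or_eq_true, not_or, List.isEmpty_iff, List.any_eq_true, not_exists, not_and] at _h
  obtain ⟨h1, h2⟩ := _h
  cases m with
  | nil => exact absurd rfl h1
  | cons r rs =>
    have hr : r ≠ [] := by intro hc; exact h2 r (by simp) (by simp [hc])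
    cases r with
    | nil => exact absurd rfl hr
    | cons a t => simp

def gravCalc_alt (mat : List (List Int)) (dir : String) : List (List Int) :=
  if dir = "l" then mat.map (fun row => compactRow row false)
  else if dir = "r" then mat.map (fun row => compactRow row true)
  else if dir = "u" ∨ dir = "d" then
    let cols := (pyZipStar mat).map (fun col => compactRow col (decide (dir = "d")))
    pyZipStar cols
  else mat

-- ===== PRECONDITION & SPEC =====
-- Pre_ restricts the vertical directions "u"/"d" to nonempty rectangular matrices with a nonempty first
-- row: on other matrices A either raises IndexError (empty matrix, empty first row, or a row shorter than
-- the first) or, when the first row is strictly shortest, silently truncates longer rows to its width — an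
-- artefact of A's index-based transposition on input its game never produces (B's zip happens to agree there).
def Pre_gravCalc (mat : List (List Int)) (dir : String) : Prop :=
  (dir = "u" ∨ dir = "d") → (mat ≠ [] ∧ mat.headI ≠ [] ∧ ∀ r ∈ mat, r.length = mat.headI.length)
instance (mat : List (List Int)) (dir : String) : Decidable (Pre_gravCalc mat dir) := by unfold Pre_gravCalc; infer_instance

def pvWitness_gravCalc : List (List Int) × String := ([[2, 0], [0, 3]], "u")

def Spec_gravCalc (mat : List (List Int)) (dir : String) (out : List (List Int)) : Prop := out = gravCalc_alt mat dir
instance (mat : List (List Int)) (dir : String) (out : List (List Int)) : Decidable (Spec_gravCalc mat dir out) := by unfold Spec_gravCalc; infer_instance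

-- ===== CLAIM (what is proved, stated in full; the proofs are below) =====
def Claim_equal_gravCalc : Prop := ∀ (mat : List (List Int)) (dir : String), Dom_gravCalc mat dir → Pre_gravCalc mat dir → Spec_gravCalc mat dir (gravCalc mat dir)

-- ===== LEMMAS AND PROOFS =====

-- insertBy walks past every element it does not insert in front of
lemma insertBy_append_of_not {α : Type} (before : α → α → Bool) (x : α) (pre ys : List α)
    (h : ∀ y ∈ pre, before x y = false) :
    PySem.List.insertBy before x (pre ++ ys) = pre ++ PySem.List.insertBy before x ys := by
  induction pre with
  | nil => simp
  | cons p ps ih =>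
    simp only [List.cons_append, PySem.List.insertBy, h p (by simp)]
    simp only [Bool.false_eq_true, if_false, List.cons.injEq, true_and]
    exact ih (fun y hy => h y (by simp [hy]))

lemma insertBy_replicate_zero (x : Int) (hx : x ≠ 0) (m : Nat) :
    PySem.List.insertBy (fun a b => decide ((a == 0) < (b == 0))) x (List.replicate m 0)
      = x :: List.replicate m 0 := by
  cases m with
  | zero => simp [PySem.List.insertBy]
  | succ k => simp [List.replicate_succ, PySem.List.insertBy, Bool.lt_iff, hx]

lemma insertBy_zero_nonzeros (nz : List Int) (hnz : ∀ y ∈ nz, y ≠ 0) :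
    PySem.List.insertBy (fun a b => decide ((b == 0) < (a == 0))) 0 nz = 0 :: nz := by
  cases nz with
  | nil => simp [PySem.List.insertBy]
  | cons y t => simp [PySem.List.insertBy, Bool.lt_iff, hnz y (by simp)]

lemma nonzeros_snoc (nz : List Int) (x : Int) (hnz : ∀ y ∈ nz, y ≠ 0) (hx : x ≠ 0) :
    ∀ y ∈ nz ++ [x], y ≠ 0 := by
  intro y hy
  rcases List.mem_append.1 hy with h | h
  · exact hnz y h
  · simp at h; omega

-- loop invariant of A's stable insertion sort with key (x == 0), reverse=False:
-- the accumulator is always "nonzeros so far, then the zeros so far"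
lemma foldlL (xs : List Int) (nz : List Int) (m : Nat) (hnz : ∀ y ∈ nz, y ≠ 0) :
    xs.foldl (fun acc x => PySem.List.insertBy (fun a b => decide ((a == 0) < (b == 0))) x acc)
      (nz ++ List.replicate m 0)
    = (nz ++ xs.filter (fun x => x != 0)) ++ List.replicate (m + xs.countP (fun x => x == 0)) 0 := by
  induction xs generalizing nz m with
  | nil => simp
  | cons x xs ih =>
    simp only [List.foldl_cons]
    by_cases hx : x = 0
    · subst hx
      have hstep : PySem.List.insertBy (fun a b => decide ((a == 0) < (b == 0))) 0
          (nz ++ List.replicate m 0) = nz ++ List.replicate (m + 1) 0 := by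
        have := insertBy_append_of_not (fun a b => decide (((a : Int) == 0) < (b == 0))) 0
          (nz ++ List.replicate m 0) [] (by intro y hy; simp [Bool.lt_iff])
        simpa [List.replicate_succ', List.append_assoc, PySem.List.insertBy] using this
      rw [hstep, ih nz (m + 1) hnz]
      have hcount : m + 1 + xs.countP (fun x => x == 0)
          = m + (0 :: xs).countP (fun x : Int => x == 0) := by
        simp; omega
      rw [hcount]
      simp
    · have hstep : PySem.List.insertBy (fun a b => decide ((a == 0) < (b == 0))) x
          (nz ++ List.replicate m 0) = (nz ++ [x]) ++ List.replicate m 0 := by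
        rw [insertBy_append_of_not _ x nz _ (by intro y hy; simp [Bool.lt_iff, hnz y hy]),
            insertBy_replicate_zero x hx m]
        simp
      rw [hstep, ih (nz ++ [x]) m (nonzeros_snoc nz x hnz hx)]
      simp [hx]

-- the reverse=True twin: the accumulator is "zeros so far, then nonzeros so far"
lemma foldlR (xs : List Int) (nz : List Int) (m : Nat) (hnz : ∀ y ∈ nz, y ≠ 0) :
    xs.foldl (fun acc x => PySem.List.insertBy (fun a b => decide ((b == 0) < (a == 0))) x acc)
      (List.replicate m 0 ++ nz)
    = List.replicate (m + xs.countP (fun x => x == 0)) 0 ++ (nz ++ xs.filter (fun x => x != 0)) := by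
  induction xs generalizing nz m with
  | nil => simp
  | cons x xs ih =>
    simp only [List.foldl_cons]
    by_cases hx : x = 0
    · subst hx
      have hstep : PySem.List.insertBy (fun a b => decide ((b == 0) < (a == 0))) 0
          (List.replicate m 0 ++ nz) = List.replicate (m + 1) 0 ++ nz := by
        rw [insertBy_append_of_not _ 0 (List.replicate m 0) nz
              (by intro y hy; simp at hy; simp [hy.2]),
            insertBy_zero_nonzeros nz hnz]
        simp [List.replicate_succ', List.append_assoc]
      rw [hstep, ih nz (m + 1) hnz]
      have hcount : m + 1 + xs.countP (fun x => x == 0)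
          = m + (0 :: xs).countP (fun x : Int => x == 0) := by
        simp; omega
      rw [hcount]
      simp
    · have hstep : PySem.List.insertBy (fun a b => decide ((b == 0) < (a == 0))) x
          (List.replicate m 0 ++ nz) = List.replicate m 0 ++ (nz ++ [x]) := by
        have := insertBy_append_of_not (fun a b => decide (((b : Int) == 0) < (a == 0))) x
          (List.replicate m 0 ++ nz) [] (by intro y hy; simp [Bool.lt_iff, hx])
        simpa [List.append_assoc, PySem.List.insertBy] using this
      rw [hstep, ih (nz ++ [x]) m (nonzeros_snoc nz x hnz hx)]
      simp [hx]

lemma count_zero_eq (row : List Int) :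
    row.countP (fun x => x == 0) = row.length - (row.filter (fun x => x != 0)).length := by
  induction row with
  | nil => simp
  | cons x xs ih =>
    have hle := List.length_filter_le (fun x : Int => x != 0) xs
    by_cases hx : x = 0 <;> simp [hx] <;> omega

lemma sortL_eq (row : List Int) :
    PySem.List.sorted row (fun x => x == 0) = compactRow row false := by
  rw [PySem.List.sorted_eq_foldl_insertBy]
  have := foldlL row [] 0 (by simp)
  simp only [List.nil_append, List.replicate_zero, List.append_nil, Nat.zero_add] at this
  rw [this, count_zero_eq]
  simp [compactRow]

lemma sortR_eq (row : List Int) :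
    PySem.List.sorted row (fun x => x == 0) true = compactRow row true := by
  rw [PySem.List.sorted_rev_eq_foldl_insertBy]
  have := foldlR row [] 0 (by simp)
  simp only [List.append_nil, List.replicate_zero, List.nil_append, Nat.zero_add] at this
  rw [this, count_zero_eq]
  simp [compactRow]

lemma compactRow_length (row : List Int) (b : Bool) : (compactRow row b).length = row.length := by
  have := List.length_filter_le (fun x : Int => x != 0) row
  cases b <;> simp [compactRow] <;> omega

-- the columns of m, by index
def colsOf (m : List (List Int)) (k : Nat) : List (List Int) :=
  (List.range k).map (fun i => m.map (fun r => r.getD i 0))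

lemma map_range_getD {α β : Type} (m : List α) (d : α) (g : α → β) :
    (List.range m.length).map (fun j => g (m.getD j d)) = m.map g := by
  apply List.ext_getElem
  · simp
  · intro i h1 h2
    have hi : i < m.length := by simpa using h1
    simp [List.getD_eq_getElem?_getD, List.getElem?_eq_getElem hi]

lemma pyTransposeA_eq_colsOf (m : List (List Int)) :
    pyTransposeA m = colsOf m m.headI.length := by
  unfold pyTransposeA colsOf
  refine List.map_congr_left (fun i _ => ?_)
  exact map_range_getD m [] (fun r => r.getD i 0)

-- on a nonempty rectangular matrix the index transpose is the zip transpose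
lemma colsOf_eq_zip (k : Nat) (m : List (List Int)) (hm : m ≠ [])
    (hr : ∀ r ∈ m, r.length = k) : colsOf m k = pyZipStar m := by
  induction k generalizing m with
  | zero =>
    rw [pyZipStar]
    have hany : m.any (fun r => r.isEmpty) = true := by
      match m, hm with
      | r :: rs, _ =>
        simp only [List.any_cons, Bool.or_eq_true]
        left
        simpa [List.isEmpty_iff, List.length_eq_zero_iff] using hr r (by simp)
    simp [colsOf, hany]
  | succ k ih =>
    have hne : ∀ r ∈ m, r ≠ [] := by
      intro r hrm hc; have := hr r hrm; simp [hc] at this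
    rw [pyZipStar]
    have hcond : (m.isEmpty || m.any fun r => r.isEmpty) = false := by
      simp only [Bool.or_eq_false_iff, List.isEmpty_eq_false_iff, List.any_eq_false]
      exact ⟨hm, fun r hrm => by simpa [List.isEmpty_iff] using hne r hrm⟩
    rw [dif_neg (by simp [hcond])]
    have htails : colsOf (m.map (fun r => r.tail)) k = pyZipStar (m.map (fun r => r.tail)) := by
      apply ih
      · simpa using hm
      · intro r hrm
        simp only [List.mem_map] at hrm
        obtain ⟨s, hsm, rfl⟩ := hrm
        have := hr s hsm
        simp [List.length_tail, this]
    rw [← htails]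
    unfold colsOf
    rw [List.range_succ_eq_map]
    simp only [List.map_cons, List.map_map]
    congr 1
    · refine List.map_congr_left (fun r hrm => ?_)
      match r, hne r hrm with
      | a :: t, _ => simp
    · refine List.map_congr_left (fun i _ => ?_)
      simp only [Function.comp]
      refine List.map_congr_left (fun r hrm => ?_)
      match r, hne r hrm with
      | a :: t, _ => simp

-- ===== VERDICT (by name: the statement is the Claim_ definition above) =====
theorem gravCalc_spec : Claim_equal_gravCalc := by
  intro mat dir _ hpre
  unfold Spec_gravCalc gravCalc gravCalc_alt
  by_cases hl : dir = "l"
  · subst hl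
    rw [if_pos (Or.inr rfl), if_pos rfl]
    refine List.map_congr_left (fun row _ => ?_)
    rw [if_pos rfl]
    exact sortL_eq row
  · by_cases hrr : dir = "r"
    · subst hrr
      rw [if_pos (Or.inl rfl), if_neg (by decide), if_pos rfl]
      refine List.map_congr_left (fun row _ => ?_)
      rw [if_neg (by decide)]
      exact sortR_eq row
    · by_cases hud : dir = "u" ∨ dir = "d"
      · obtain ⟨hm, h0, hr⟩ := hpre hud
        have hnr : ¬ (dir = "r" ∨ dir = "l") := by tauto
        rw [if_neg hnr, if_pos (by tauto), if_neg hl, if_neg hrr, if_pos (by tauto)]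
        dsimp only
        set k := mat.headI.length with hk
        have hk0 : 0 < k := by
          rw [hk]; exact List.length_pos_iff.2 h0
        have h1 : pyTransposeA mat = pyZipStar mat := by
          rw [pyTransposeA_eq_colsOf]
          exact colsOf_eq_zip k mat hm hr
        have hrow : ∀ row : List Int,
            (if dir = "u" then PySem.List.sorted row (fun x => x == 0)
             else PySem.List.sorted row (fun x => x == 0) true)
            = compactRow row (decide (dir = "d")) := by
          intro row
          rcases hud with h | h
          · simp [h, sortL_eq row]
          · simp [h, sortR_eq row]
        have h2 : (pyTransposeA mat).map (fun row =>
            if dir = "u" then PySem.List.sorted row (fun x => x == 0)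
            else PySem.List.sorted row (fun x => x == 0) true)
            = (pyZipStar mat).map (fun col => compactRow col (decide (dir = "d"))) := by
          rw [h1]; exact List.map_congr_left (fun row _ => hrow row)
        rw [h2]
        set S := (pyZipStar mat).map (fun col => compactRow col (decide (dir = "d"))) with hS
        have hT : pyZipStar mat = colsOf mat k := (colsOf_eq_zip k mat hm hr).symm
        have hSlen : S.length = k := by simp [hS, hT, colsOf]
        have hSne : S ≠ [] := by
          intro hc; rw [hc] at hSlen; simp at hSlen; omega
        have hSrows : ∀ r ∈ S, r.length = mat.length := by
          intro r hrS
          rw [hS, hT] at hrS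
          simp only [colsOf, List.map_map, List.mem_map] at hrS
          obtain ⟨i, _, rfl⟩ := hrS
          simp [Function.comp, compactRow_length]
        have hShead : S.headI.length = mat.length := by
          apply hSrows
          match S, hSne with
          | r :: rs, _ => simp
        rw [pyTransposeA_eq_colsOf, hShead]
        exact colsOf_eq_zip mat.length S hSne hSrows
      · have hnr : ¬ (dir = "r" ∨ dir = "l") := by tauto
        rw [if_neg hnr, if_neg (by tauto), if_neg hl, if_neg hrr, if_neg hud]
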